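-- pv_equiv track=rewrite | github.com/nishantchauhan00/GeeksForGeeks | Companies Question/09 Finger Game.py | finger1
-- ===== SOURCE A (Python) =====
-- def finger1(n):
--     out = 1
--     forward = True
--     while n > 1:
--         if forward:
--             out += 1
--             if out == 5:
--                 forward = False
--         else:
--             out -= 1
--             if out == 1:
--                 forward = True
--         n -= 1
--     return out
-- ===== SOURCE B (Python) =====
-- def finger1(n):
--     if n <= 1:
--         return 1
--     r = (n - 1) % 8
--     return r + 1 if r <= 4 else 9 - r
-- ===== Notes on version B (the rewrite author's own statement) =====
-- stated objective: faster
-- what changed: Replaced A's step-by-step oscillation loop with a constant-time closed form that reads the position off the period-eight cycle via modular arithmetic.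
import Mathlib
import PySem

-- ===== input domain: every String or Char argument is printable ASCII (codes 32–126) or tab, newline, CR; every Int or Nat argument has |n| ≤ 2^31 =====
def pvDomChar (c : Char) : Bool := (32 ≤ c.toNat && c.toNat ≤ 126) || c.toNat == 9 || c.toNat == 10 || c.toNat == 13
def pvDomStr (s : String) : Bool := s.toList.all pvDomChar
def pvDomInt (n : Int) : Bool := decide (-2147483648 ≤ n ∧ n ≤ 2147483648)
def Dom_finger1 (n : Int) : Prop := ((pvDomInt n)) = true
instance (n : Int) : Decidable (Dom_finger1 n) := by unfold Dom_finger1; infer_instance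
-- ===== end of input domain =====

-- B replaces A's O(n) step-by-step oscillation with an O(1) period-8 closed form (faster, asymptotic).

-- ===== PORT A =====
-- the while loop of A, step for step: state (n, out, forward)
def fingerLoop (n out : Int) (forward : Bool) : Int :=
  if h : n > 1 then
    if forward then
      let out' := out + 1
      fingerLoop (n - 1) out' (if out' = 5 then false else true)
    else
      let out' := out - 1
      fingerLoop (n - 1) out' (if out' = 1 then true else false)
  else out
termination_by n.toNat
decreasing_by all_goals omega

def finger1 (n : Int) : Int := fingerLoop n 1 true

-- ===== PORT B =====
def finger1_alt (n : Int) : Int :=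
  if n ≤ 1 then 1
  else
    let r := PySem.Int.mod (n - 1) 8
    if r ≤ 4 then r + 1 else 9 - r

-- ===== PRECONDITION & SPEC =====
def Spec_finger1 (n : Int) (out : Int) : Prop := out = finger1_alt n
instance (n : Int) (out : Int) : Decidable (Spec_finger1 n out) := by unfold Spec_finger1; infer_instance

-- ===== CLAIM (what is proved, stated in full; the proofs are below) =====
def Claim_equal_finger1 : Prop := ∀ (n : Int), Dom_finger1 n → Spec_finger1 n (finger1 n)

-- ===== LEMMAS AND PROOFS =====

lemma fingerLoop_stop (n out : Int) (f : Bool) (h : ¬ n > 1) : fingerLoop n out f = out := by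
  rw [fingerLoop]; simp [h]

lemma fingerLoop_stepT (m out : Int) (h : m > 1) (h5 : out + 1 ≠ 5) :
    fingerLoop m out true = fingerLoop (m - 1) (out + 1) true := by
  conv_lhs => rw [fingerLoop]
  simp [h, h5]

lemma fingerLoop_stepT5 (m : Int) (h : m > 1) :
    fingerLoop m 4 true = fingerLoop (m - 1) 5 false := by
  conv_lhs => rw [fingerLoop]
  norm_num [h]

lemma fingerLoop_stepF (m out : Int) (h : m > 1) (h1 : out - 1 ≠ 1) :
    fingerLoop m out false = fingerLoop (m - 1) (out - 1) false := by
  conv_lhs => rw [fingerLoop]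
  simp [h, h1]

lemma fingerLoop_stepF1 (m : Int) (h : m > 1) :
    fingerLoop m 2 false = fingerLoop (m - 1) 1 true := by
  conv_lhs => rw [fingerLoop]
  norm_num [h]

-- unfolding 8 steps of the loop from the start state returns to the start state
lemma fingerLoop_period (n : Int) (h : n ≥ 1) :
    fingerLoop (n + 8) 1 true = fingerLoop n 1 true := by
  rw [fingerLoop_stepT _ _ (by omega) (by norm_num),
      fingerLoop_stepT _ _ (by omega) (by norm_num),
      fingerLoop_stepT _ _ (by omega) (by norm_num)]
  norm_num
  rw [show n + 8 - 1 - 1 - 1 = n + 5 by ring,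
      fingerLoop_stepT5 _ (by omega),
      fingerLoop_stepF _ _ (by omega) (by norm_num),
      fingerLoop_stepF _ _ (by omega) (by norm_num),
      fingerLoop_stepF _ _ (by omega) (by norm_num)]
  norm_num
  rw [show n + 5 - 1 - 1 - 1 - 1 = n + 1 by ring,
      fingerLoop_stepF1 _ (by omega)]
  norm_num

lemma main_lemma : ∀ (m : Nat), fingerLoop ((m : Int) + 2) 1 true = finger1_alt ((m : Int) + 2) := by
  intro m
  induction m using Nat.strong_induction_on with
  | _ m ih =>
    by_cases hm : m < 8
    · interval_cases m <;>
        simp [finger1_alt, PySem.Int.mod, fingerLoop, fingerLoop_stop]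
    · obtain ⟨k, rfl⟩ : ∃ k, m = k + 8 := ⟨m - 8, by omega⟩
      have h1 : ((k + 8 : Nat) : Int) + 2 = ((k : Int) + 2) + 8 := by push_cast; ring
      have hmod : PySem.Int.mod ((k : Int) + 2 + 8 - 1) 8 = PySem.Int.mod ((k : Int) + 2 - 1) 8 := by
        rw [PySem.Int.mod_eq_emod_of_pos (by omega), PySem.Int.mod_eq_emod_of_pos (by omega)]
        omega
      have h2 : finger1_alt (((k : Int) + 2) + 8) = finger1_alt ((k : Int) + 2) := by
        unfold finger1_alt
        rw [if_neg (show ¬((k : Int) + 2 + 8 ≤ 1) from by omega),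
            if_neg (show ¬((k : Int) + 2 ≤ 1) from by omega), hmod]
      rw [h1, fingerLoop_period _ (by omega), ih k (by omega), h2]

-- ===== VERDICT (by name: the statement is the Claim_ definition above) =====
theorem finger1_spec : Claim_equal_finger1 := by
  intro n _
  unfold Spec_finger1 finger1
  by_cases h : n ≤ 1
  · rw [fingerLoop_stop _ _ _ (by omega)]
    simp [finger1_alt, h]
  · obtain ⟨m, hm⟩ : ∃ m : Nat, n = (m : Int) + 2 :=
      ⟨(n - 2).toNat, by omega⟩
    rw [hm]; exact main_lemma m
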